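-- pv_equiv track=rewrite | github.com/chunghee-hwang/AlgorithmStudy | src/kakao/level1/secret_map.py | solution
-- ===== SOURCE A (Python) =====
-- def fill_map(n, arr, secret_map):
--     for row in range(n):
--         num = arr[row]
--         for col in range(n-1, -1, -1):
--             digit = num % 2
--             num //= 2
--             if digit == 0:
--                 if secret_map[row][col] != '#':
--                     secret_map[row][col] = ' '
--             else:
--                 secret_map[row][col] = '#'
--
-- def solution(n, arr1, arr2):
--     secret_map = [['' for x in range(n)] for y in range(n)]
--     answer = []
--     fill_map(n, arr1, secret_map)
--     fill_map(n, arr2, secret_map)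
--     for row in secret_map:
--         answer.append(''.join(row))
--     return answer
-- ===== SOURCE B (Python) =====
-- def solution(n, arr1, arr2):
--     # One pass, no mutable grid: cell (i, j) is '#' iff bit n-1-j of arr1[i] or of arr2[i] is set.
--     if n <= 0:
--         return []
--     pows = [2 ** k for k in range(n - 1, -1, -1)]
--     return [''.join('#' if (a // p) % 2 or (b // p) % 2 else ' ' for p in pows)
--             for a, b in zip(arr1[:n], arr2[:n])]
-- ===== Notes on version B (the rewrite author's own statement) =====
-- stated objective: simpler
-- what changed: B drops A's mutable n-by-n grid and its two sequential fill passes (LSB-first bit consumption with conditional overwrite) and instead renders each output row directly in one comprehension, testing bit n-1-j of each pair of row numbers with a closed-form (a // p) % 2 over a precomputed power-of-two table.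
import Mathlib
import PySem

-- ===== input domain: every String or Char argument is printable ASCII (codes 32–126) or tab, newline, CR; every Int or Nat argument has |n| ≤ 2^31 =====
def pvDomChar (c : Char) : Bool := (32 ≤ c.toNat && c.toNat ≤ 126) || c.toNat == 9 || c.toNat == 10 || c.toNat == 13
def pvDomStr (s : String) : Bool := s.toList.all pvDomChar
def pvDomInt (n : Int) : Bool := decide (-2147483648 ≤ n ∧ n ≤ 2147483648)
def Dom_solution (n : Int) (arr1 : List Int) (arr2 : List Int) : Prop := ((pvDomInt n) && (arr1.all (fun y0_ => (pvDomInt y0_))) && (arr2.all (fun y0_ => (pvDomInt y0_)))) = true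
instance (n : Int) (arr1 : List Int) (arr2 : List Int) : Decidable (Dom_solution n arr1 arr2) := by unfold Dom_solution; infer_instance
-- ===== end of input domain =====

-- B renders each row directly from the bits of the two row numbers instead of A's mutable 2-D grid with two fill passes (objective: simpler).


-- ===== PORT A =====
-- inner loop of fill_map: 'for col in range(n-1,-1,-1): digit = num % 2; num //= 2; …' mutating one row
def fillRowLoop : List Int → List String → Int → List String
  | [], row, _ => row
  | c :: rest, row, num =>
    let digit := PySem.Int.mod num 2
    let num' := PySem.Int.floordiv num 2
    let row' :=
      if digit = 0 then
        (if row.getD c.toNat "" ≠ "#" then row.set c.toNat " " else row)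
      else row.set c.toNat "#"
    fillRowLoop rest row' num'

-- fill_map: 'arr[row]' raises IndexError for row ≥ len(arr); Pre_solution excludes exactly that, so the getD default is never used inside Pre_
def fillMap (n : Int) (arr : List Int) (grid : List (List String)) : List (List String) :=
  (PySem.List.pyRange 0 n 1).foldl
    (fun g r =>
      g.set r.toNat
        (fillRowLoop (PySem.List.pyRange (n - 1) (-1) (-1)) (g.getD r.toNat [])
          (PySem.List.pyGetD arr r 0)))
    grid

def solution (n : Int) (arr1 : List Int) (arr2 : List Int) : List String :=
  let grid0 := (PySem.List.pyRange 0 n 1).map (fun _ => (PySem.List.pyRange 0 n 1).map (fun _ => ""))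
  let g1 := fillMap n arr1 grid0
  let g2 := fillMap n arr2 g1
  g2.map (fun row => PySem.Str.join "" row)

-- ===== PORT B =====
-- '2 ** k' with k drawn from range(n-1,-1,-1), so k ≥ 0 and the Nat exponent 'k.toNat' is exact
def solution_alt (n : Int) (arr1 : List Int) (arr2 : List Int) : List String :=
  if n ≤ 0 then []
  else
    let pows := (PySem.List.pyRange (n - 1) (-1) (-1)).map (fun k => (2 : Int) ^ k.toNat)
    (List.zip (PySem.List.slice arr1 none (some n)) (PySem.List.slice arr2 none (some n))).map
      (fun p => PySem.Str.join ""
        (pows.map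
          (fun q =>
            if PySem.Int.mod (PySem.Int.floordiv p.1 q) 2 ≠ 0 ∨
               PySem.Int.mod (PySem.Int.floordiv p.2 q) 2 ≠ 0
            then "#" else " ")))

-- ===== PRECONDITION & SPEC =====
-- Pre_ excludes exactly the inputs where A raises IndexError: 0 < n but one of the input lists is shorter than n
def Pre_solution (n : Int) (arr1 : List Int) (arr2 : List Int) : Prop :=
  n ≤ (arr1.length : Int) ∧ n ≤ (arr2.length : Int)
instance (n : Int) (arr1 : List Int) (arr2 : List Int) : Decidable (Pre_solution n arr1 arr2) := by
  unfold Pre_solution; infer_instance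
def pvWitness_solution : Int × List Int × List Int := (2, [3, 2], [1, 2])

def Spec_solution (n : Int) (arr1 : List Int) (arr2 : List Int) (out : List String) : Prop := out = solution_alt n arr1 arr2
instance (n : Int) (arr1 : List Int) (arr2 : List Int) (out : List String) : Decidable (Spec_solution n arr1 arr2 out) := by unfold Spec_solution; infer_instance

-- ===== CLAIM (what is proved, stated in full; the proofs are below) =====
def Claim_equal_solution : Prop := ∀ (n : Int) (arr1 : List Int) (arr2 : List Int), Dom_solution n arr1 arr2 → Pre_solution n arr1 arr2 → Spec_solution n arr1 arr2 (solution n arr1 arr2)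

-- ===== LEMMAS AND PROOFS =====

-- value of one cell after one fill pass: previous content 'old', bit t of 'num'
def cellVal (num : Int) (t : Nat) (old : String) : String :=
  if PySem.Int.mod (PySem.Int.floordiv num (2 ^ t)) 2 = 0 then
    (if old ≠ "#" then " " else old) else "#"

theorem fdiv_fdiv_pow (num : Int) (t : Nat) :
    PySem.Int.floordiv (PySem.Int.floordiv num 2) (2 ^ t) = PySem.Int.floordiv num (2 ^ (t + 1)) := by
  rw [PySem.Int.floordiv_eq_ediv_of_pos (by norm_num), PySem.Int.floordiv_eq_ediv_of_pos (by positivity),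
      PySem.Int.floordiv_eq_ediv_of_pos (by positivity),
      Int.ediv_ediv_of_nonneg (by norm_num : (0:Int) ≤ 2)]
  ring_nf

theorem step_eq (num : Int) (row : List String) (m : Nat) (h : m < row.length) :
    (if PySem.Int.mod num 2 = 0 then
        (if row.getD m "" ≠ "#" then row.set m " " else row)
      else row.set m "#")
    = row.set m (cellVal num 0 (row.getD m "")) := by
  have h1 : PySem.Int.floordiv num (2^0) = num := by
    rw [pow_zero, PySem.Int.floordiv_eq_ediv_of_pos (by norm_num), Int.ediv_one]
  have hg : row.getD m "" = row[m] := by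
    rw [List.getD_eq_getElem?_getD, List.getElem?_eq_getElem h]; rfl
  unfold cellVal
  rw [h1]
  split_ifs with hd ho
  · rfl
  · conv_lhs => rw [← List.set_getElem_self (as := row) (h := h), ← hg]
  · rfl

theorem drop_set_self (l : List String) (n : Nat) (v : String) (h : n < l.length) :
    (l.set n v).drop n = v :: l.drop (n+1) := by
  rw [List.set_eq_take_append_cons_drop]
  have ht : (l.take n).length = n := by simp [Nat.min_eq_left h.le]
  rw [show n = (l.take n).length from ht.symm] at *
  simp [h]

theorem fillRowLoop_spec (m : Nat) : ∀ (num : Int) (row : List String), m ≤ row.length →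
    fillRowLoop (PySem.List.pyRange ((m : Int) - 1) (-1) (-1)) row num
    = ((List.range m).map (fun j => cellVal num (m - 1 - j) (row.getD j ""))) ++ row.drop m := by
  induction m with
  | zero =>
    intro num row h
    rw [show ((0:Nat):Int) - 1 = -1 by norm_num, PySem.List.pyRange_neg_one_eq_nil (by norm_num)]
    simp [fillRowLoop]
  | succ m ih =>
    intro num row h
    have hm : m < row.length := h
    rw [show ((m+1:Nat):Int) - 1 = (m:Int) by push_cast; ring,
        PySem.List.pyRange_neg_one_cons (by omega : (-1:Int) < (m:Int))]
    simp only [fillRowLoop, Int.toNat_natCast]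
    rw [step_eq num row m hm]
    rw [ih (PySem.Int.floordiv num 2) (row.set m (cellVal num 0 (row.getD m ""))) (by simpa using hm.le)]
    rw [drop_set_self row m _ hm, List.range_succ, List.map_append]
    simp only [List.map_cons, List.map_nil, Nat.add_sub_cancel, Nat.sub_self, List.append_assoc,
      List.singleton_append]
    congr 1
    apply List.map_congr_left
    intro j hj
    have hjm : j < m := List.mem_range.mp hj
    have hgd : (row.set m (cellVal num 0 (row.getD m ""))).getD j "" = row.getD j "" := by
      rw [List.getD_eq_getElem?_getD, List.getElem?_set_ne (by omega), ← List.getD_eq_getElem?_getD]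
    rw [hgd]
    unfold cellVal
    rw [fdiv_fdiv_pow num (m - 1 - j), show m - 1 - j + 1 = m - j by omega]

theorem fold_len (step : List (List String) → Int → List (List String))
    (hs : ∀ g r, (step g r).length = g.length) :
    ∀ (rs : List Int) (grid : List (List String)), (rs.foldl step grid).length = grid.length := by
  intro rs
  induction rs with
  | nil => intro grid; rfl
  | cons r rest ih => intro grid; simpa [List.foldl, hs] using (ih (step grid r)).trans (hs grid r)

theorem fold_set_spec (arr : List Int) (cols : List Int) :
    ∀ (rs : List Int) (grid : List (List String)),
      (∀ r ∈ rs, 0 ≤ r) → (rs.map Int.toNat).Nodup →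
      ∀ (j : Nat), j < grid.length →
      (rs.foldl (fun g r =>
          g.set r.toNat (fillRowLoop cols (g.getD r.toNat []) (PySem.List.pyGetD arr r 0))) grid)[j]?
      = if (j : Int) ∈ rs then
          some (fillRowLoop cols (grid.getD j []) (PySem.List.pyGetD arr (j : Int) 0))
        else grid[j]? := by
  intro rs
  induction rs with
  | nil => intro grid _ _ j hj; simp
  | cons r rest ih =>
    intro grid hpos hnd j hj
    have hr0 : 0 ≤ r := hpos r (by simp)
    have hnd2 : (r.toNat :: rest.map Int.toNat).Nodup := by simpa using hnd
    have hnd' : (rest.map Int.toNat).Nodup := (List.nodup_cons.mp hnd2).2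
    have hrn : r.toNat ∉ rest.map Int.toNat := (List.nodup_cons.mp hnd2).1
    simp only [List.foldl_cons]
    set v := fillRowLoop cols (grid.getD r.toNat []) (PySem.List.pyGetD arr r 0) with hv
    have hlen : (grid.set r.toNat v).length = grid.length := by simp
    rw [ih (grid.set r.toNat v) (fun x hx => hpos x (by simp [hx])) hnd' j (by omega)]
    by_cases hmem : (j : Int) ∈ rest
    · have hjr : j ≠ r.toNat := by
        intro hEq
        exact hrn (hEq ▸ List.mem_map.mpr ⟨(j:Int), hmem, by simp⟩)
      have hgd : (grid.set r.toNat v).getD j [] = grid.getD j [] := by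
        rw [List.getD_eq_getElem?_getD, List.getElem?_set_ne (Ne.symm hjr), ← List.getD_eq_getElem?_getD]
      rw [if_pos hmem, if_pos (List.mem_cons_of_mem _ hmem), hgd]
    · by_cases hjr : (j : Int) = r
      · have hjn : r.toNat = j := by omega
        rw [if_neg hmem, if_pos (by simp [hjr]), hv, hjn, List.getElem?_set_self hj, ← hjr]
      · have hjn : j ≠ r.toNat := by omega
        rw [if_neg hmem, if_neg (by simp [hjr, hmem]), List.getElem?_set_ne (Ne.symm hjn)]

theorem cell_combine (t : Nat) (a b : Int) :
    cellVal b t (cellVal a t "") =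
      if PySem.Int.mod (PySem.Int.floordiv a (2 ^ t)) 2 ≠ 0 ∨
         PySem.Int.mod (PySem.Int.floordiv b (2 ^ t)) 2 ≠ 0 then "#" else " " := by
  unfold cellVal
  split_ifs with h1 h2 h3 h4 h5 h6 h7 h8 <;> first | rfl | tauto

theorem rowA_eq (N : Nat) (a b : Int) :
    fillRowLoop (PySem.List.pyRange ((N : Int) - 1) (-1) (-1))
      (fillRowLoop (PySem.List.pyRange ((N : Int) - 1) (-1) (-1)) (List.replicate N "") a) b
    = (List.range N).map (fun j =>
        if PySem.Int.mod (PySem.Int.floordiv a (2 ^ (N - 1 - j))) 2 ≠ 0 ∨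
           PySem.Int.mod (PySem.Int.floordiv b (2 ^ (N - 1 - j))) 2 ≠ 0 then "#" else " ") := by
  have h1 : fillRowLoop (PySem.List.pyRange ((N : Int) - 1) (-1) (-1)) (List.replicate N "") a
      = (List.range N).map (fun j => cellVal a (N - 1 - j) "") := by
    rw [fillRowLoop_spec N a (List.replicate N "") (by simp)]
    simp
  rw [h1, fillRowLoop_spec N b _ (by simp)]
  rw [List.drop_eq_nil_of_le (by simp), List.append_nil]
  apply List.map_congr_left
  intro j hj
  have hj' : j < N := List.mem_range.mp hj
  have hgd : ((List.range N).map (fun j => cellVal a (N - 1 - j) "")).getD j "" = cellVal a (N - 1 - j) "" := by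
    rw [List.getD_eq_getElem?_getD, List.getElem?_map, List.getElem?_range hj']
    rfl
  rw [hgd, cell_combine]

theorem map_const_pyRange (n : Int) {A : Type} (x : A) :
    (PySem.List.pyRange 0 n 1).map (fun _ => x) = List.replicate n.toNat x := by
  rw [List.map_const', PySem.List.length_pyRange_one]
  norm_num

theorem rowB_eq (N : Nat) (a b : Int) :
    ((PySem.List.pyRange ((N : Int) - 1) (-1) (-1)).map (fun k => (2 : Int) ^ k.toNat)).map
      (fun q =>
        if PySem.Int.mod (PySem.Int.floordiv a q) 2 ≠ 0 ∨
           PySem.Int.mod (PySem.Int.floordiv b q) 2 ≠ 0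
        then ("#" : String) else " ")
    = (List.range N).map (fun j =>
        if PySem.Int.mod (PySem.Int.floordiv a (2 ^ (N - 1 - j))) 2 ≠ 0 ∨
           PySem.Int.mod (PySem.Int.floordiv b (2 ^ (N - 1 - j))) 2 ≠ 0 then "#" else " ") := by
  rw [List.map_map, PySem.List.pyRange_neg_one, show ((N : Int) - 1 - (-1)).toNat = N by omega,
    List.map_map]
  apply List.map_congr_left
  intro j hj
  have hj' : j < N := List.mem_range.mp hj
  have hk : ((N : Int) - 1 - (j : Int)).toNat = N - 1 - j := by omega
  simp only [Function.comp_apply, hk]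

-- ===== VERDICT (by name: the statement is the Claim_ definition above) =====
theorem solution_spec : Claim_equal_solution := by
  intro n arr1 arr2 _ hpre
  unfold Spec_solution solution solution_alt
  obtain ⟨h1, h2⟩ := hpre
  by_cases hn : n ≤ 0
  · rw [if_pos hn]
    simp [fillMap, PySem.List.pyRange_one_eq_nil hn]
  · rw [if_neg hn]
    dsimp only
    set N := n.toNat with hNdef
    have hN : (N : Int) = n := Int.toNat_of_nonneg (by omega)
    have hlen1 : N ≤ arr1.length := by omega
    have hlen2 : N ≤ arr2.length := by omega
    have hpos : ∀ r ∈ PySem.List.pyRange 0 n 1, 0 ≤ r := by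
      intro r hr
      exact (PySem.List.mem_pyRange_one.mp hr).1
    have hnodup : ((PySem.List.pyRange 0 n 1).map Int.toNat).Nodup := by
      refine List.Nodup.map_on ?_ (PySem.List.nodup_pyRange_one 0 n)
      intro x hx y hy hxy
      have hx' := PySem.List.mem_pyRange_one.mp hx
      have hy' := PySem.List.mem_pyRange_one.mp hy
      omega
    have hrow : ∀ (arr : List Int) (g : List (List String)), g.length = N → ∀ j : Nat, j < N →
        (fillMap n arr g)[j]? = some (fillRowLoop (PySem.List.pyRange (n - 1) (-1) (-1))
          (g.getD j []) (PySem.List.pyGetD arr (j : Int) 0)) := by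
      intro arr g hg j hj
      unfold fillMap
      rw [fold_set_spec arr _ (PySem.List.pyRange 0 n 1) g hpos hnodup j (by omega)]
      rw [if_pos (PySem.List.mem_pyRange_one.mpr ⟨by positivity, by omega⟩)]
    have hgrid0 : ((PySem.List.pyRange 0 n 1).map
        (fun _ => (PySem.List.pyRange 0 n 1).map (fun _ => ("" : String))))
        = List.replicate N (List.replicate N "") := by
      rw [map_const_pyRange, map_const_pyRange]
    rw [hgrid0]
    have hfl : ∀ (g : List (List String)) (r : Int),
        (g.set r.toNat (fillRowLoop (PySem.List.pyRange (n - 1) (-1) (-1))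
          (g.getD r.toNat []) (PySem.List.pyGetD arr1 r 0))).length = g.length := fun g r => by simp
    have hg1len : (fillMap n arr1 (List.replicate N (List.replicate N ""))).length = N := by
      unfold fillMap
      rw [fold_len _ (fun g r => by simp)]
      simp
    have hg2len : (fillMap n arr2 (fillMap n arr1 (List.replicate N (List.replicate N "")))).length = N := by
      unfold fillMap
      rw [fold_len _ (fun g r => by simp)]
      exact hg1len
    apply List.ext_getElem
    · rw [List.length_map, hg2len, List.length_map, List.length_zip,
        PySem.List.slice_to arr1 (by omega : (0:Int) ≤ n),
        PySem.List.slice_to arr2 (by omega : (0:Int) ≤ n),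
        List.length_take, List.length_take]
      omega
    · intro j hjL hjR
      have hj : j < N := by
        rw [List.length_map, hg2len] at hjL
        exact hjL
      -- left side row
      have hL2 := hrow arr2 _ hg1len j hj
      have hL1 := hrow arr1 (List.replicate N (List.replicate N "")) (by simp) j hj
      have hgd1 : (List.replicate N (List.replicate N ("" : String))).getD j [] = List.replicate N "" := by
        rw [List.getD_eq_getElem?_getD, List.getElem?_replicate, if_pos hj]
        rfl
      rw [hgd1] at hL1
      have hgd2 : (fillMap n arr1 (List.replicate N (List.replicate N ""))).getD j []
          = fillRowLoop (PySem.List.pyRange (n - 1) (-1) (-1)) (List.replicate N "")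
              (PySem.List.pyGetD arr1 (j : Int) 0) := by
        rw [List.getD_eq_getElem?_getD, hL1]
        rfl
      rw [hgd2] at hL2
      have hget1 : PySem.List.pyGetD arr1 (j : Int) 0 = arr1[j] := by
        rw [PySem.List.pyGetD_eq_getElem arr1 0 (by positivity) (by exact_mod_cast by omega)]
        simp
      have hget2 : PySem.List.pyGetD arr2 (j : Int) 0 = arr2[j] := by
        rw [PySem.List.pyGetD_eq_getElem arr2 0 (by positivity) (by exact_mod_cast by omega)]
        simp
      rw [List.getElem_map, List.getElem_map,
          show (fillMap n arr2 (fillMap n arr1 (List.replicate N (List.replicate N ""))))[j]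
            = fillRowLoop (PySem.List.pyRange (n - 1) (-1) (-1))
                (fillRowLoop (PySem.List.pyRange (n - 1) (-1) (-1)) (List.replicate N "")
                  (PySem.List.pyGetD arr1 (j : Int) 0))
                (PySem.List.pyGetD arr2 (j : Int) 0)
            from Option.some.inj ((List.getElem?_eq_getElem (by omega)).symm.trans hL2)]
      simp only [hget1, hget2, PySem.List.slice_to arr1 (by omega : (0:Int) ≤ n),
        PySem.List.slice_to arr2 (by omega : (0:Int) ≤ n), List.getElem_zip, List.getElem_take,
        ← hNdef]
      simp only [← hN]
      rw [rowA_eq N arr1[j] arr2[j], rowB_eq N arr1[j] arr2[j]]
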